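-- pv_equiv track=rewrite | github.com/brighteast99/coding-test-problems | programmers/2022 KAKAO BLIND RECRUITMENT/신고 결과 받기/solution.py | solution
-- ===== SOURCE A (Python) =====
-- def solution(id_list, report, k):
--     id_index = {}
--     for i in range(len(id_list)):
--         id_index[id_list[i]] = i
--
--     reported = {}
--     for rpt in report:
--         [user, reported_user] = rpt.split(' ')
--
--         if reported_user not in reported:
--             reported[reported_user] = set()
--
--         reported[reported_user].add(user)
--
--     answer = [0 for _ in range(len(id_list))]
--     for reported_user in reported:
--         users = reported[reported_user]
--         if len(users) < k:
--             continue
--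
--         for user in users:
--             answer[id_index[user]] += 1
--
--     return answer
-- ===== SOURCE B (Python) =====
-- def solution(id_list, report, k):
--     # dedup (reporter, reported) pairs once
--     pairs = set()
--     for r in report:
--         u, v = r.split(' ')
--         pairs.add((u, v))
--     # distinct-reporter count per reported user
--     counts = {}
--     for _, v in pairs:
--         counts[v] = counts.get(v, 0) + 1
--     # who each reporter reported
--     by_reporter = {}
--     for u, v in pairs:
--         by_reporter.setdefault(u, set()).add(v)
--     # one mail per reported user of mine that got suspended
--     return [sum(1 for v in by_reporter.get(u, ()) if counts.get(v, 0) >= k)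
--             for u in id_list]
-- ===== Notes on version B (the rewrite author's own statement) =====
-- stated objective: alternative
-- what changed: B groups the deduped (reporter, reported) pairs by reporter and keeps a per-victim distinct-reporter count table, then builds the answer by iterating over id_list and counting each reporter's suspended victims, instead of A's grouping by victim and scattering increments into the answer through an id->index map.
-- outside the precondition, e.g. on solution(['a', 'a'], ['a a'], 1): A returns [0, 1], B returns [1, 1]; on solution(['a'], ['a'], 1): A raises ValueError, B raises ValueError
import Mathlib
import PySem

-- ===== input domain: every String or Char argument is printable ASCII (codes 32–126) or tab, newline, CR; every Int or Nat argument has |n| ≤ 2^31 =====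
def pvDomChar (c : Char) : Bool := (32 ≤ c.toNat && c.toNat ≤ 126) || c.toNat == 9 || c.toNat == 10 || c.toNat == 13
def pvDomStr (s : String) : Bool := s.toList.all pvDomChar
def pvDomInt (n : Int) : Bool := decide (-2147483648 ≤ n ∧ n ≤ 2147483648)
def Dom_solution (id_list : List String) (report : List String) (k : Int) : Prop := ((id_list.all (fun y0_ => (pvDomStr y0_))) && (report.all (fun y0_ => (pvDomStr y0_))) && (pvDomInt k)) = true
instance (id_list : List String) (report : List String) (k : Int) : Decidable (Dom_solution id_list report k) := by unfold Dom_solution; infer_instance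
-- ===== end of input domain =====

-- ===== PORT A =====
-- B regroups by reporter with a count table instead of A's victim-grouped reporter sets; return values proved equal on Pre_.
def solution (id_list : List String) (report : List String) (k : Int) : List Int :=
  let id_index : PySem.Dict String Int :=
    (PySem.List.pyRange 0 (PySem.List.len id_list) 1).foldl
      (fun d i => d.insert (PySem.List.pyGetD id_list i "") i) PySem.Dict.empty
  let reported : PySem.Dict String (PySem.Set String) :=
    report.foldl (fun d rpt =>
      match PySem.Str.split? rpt " " with
      | some [user, reported_user] =>
        let d := if d.contains reported_user then d else d.insert reported_user PySem.Set.empty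
        d.modify reported_user PySem.Set.empty (fun s => PySem.Set.add s user)
      | _ => d) PySem.Dict.empty   -- Python raises ValueError here (unpacking); outside Pre_
  let answer : List Int := (PySem.List.pyRange 0 (PySem.List.len id_list) 1).map (fun _ => 0)
  reported.items.foldl (fun answer p =>
    let users := p.2
    if PySem.Set.len users < k then answer
    else users.foldl (fun ans user =>
      let i := (id_index.get? user).getD 0   -- none = Python KeyError; outside Pre_
      PySem.List.pySetD ans i (PySem.List.pyGetD ans i 0 + 1)) answer) answer

-- ===== PORT B =====
def solution_alt (id_list : List String) (report : List String) (k : Int) : List Int :=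
  let pairs : PySem.Set (String × String) :=
    report.foldl (fun s r =>
      let parts := (PySem.Str.split? r " ").getD []
      if parts.length = 2 then PySem.Set.add s (parts.getD 0 "", parts.getD 1 "")
      else s) PySem.Set.empty   -- length ≠ 2: Python raises ValueError on unpacking; outside Pre_
  let counts : PySem.Dict String Int :=
    pairs.foldl (fun d p => d.insert p.2 (d.getD p.2 0 + 1)) PySem.Dict.empty
  let by_reporter : PySem.Dict String (PySem.Set String) :=
    pairs.foldl (fun d p => d.modify p.1 PySem.Set.empty (fun s => PySem.Set.add s p.2)) PySem.Dict.empty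
  id_list.map (fun u =>
    ((((by_reporter.getD u PySem.Set.empty).filter (fun v => decide (k ≤ counts.getD v 0))).length : Nat) : Int))

-- ===== PRECONDITION & SPEC =====
-- first and second token of a report row (rows are "reporter victim")
def rowPair (r : String) : String × String :=
  let parts := (PySem.Str.split? r " ").getD []
  (parts.getD 0 "", parts.getD 1 "")

-- number of DISTINCT reporters of victim v in report
def victimCount (report : List String) (v : String) : Nat :=
  (PySem.Set.ofList ((report.map rowPair).filter (fun p => p.2 == v))).length

-- Pre_ excludes: (a) duplicate ids in id_list, on which A's last-index-wins dict reinsertion is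
-- accidental (A returns there; see the cite); (b) report rows that do not split into exactly two
-- tokens (A raises ValueError on unpacking, and so does B); (c) rows whose reporter is not in
-- id_list while the victim has at least k distinct reporters (exactly where A raises KeyError).
def Pre_solution (id_list : List String) (report : List String) (k : Int) : Prop :=
  id_list.Nodup ∧
  (∀ r ∈ report, ((PySem.Str.split? r " ").getD []).length = 2) ∧
  (∀ r ∈ report, (rowPair r).1 ∉ id_list → (victimCount report (rowPair r).2 : Int) < k)
instance (id_list : List String) (report : List String) (k : Int) : Decidable (Pre_solution id_list report k) := by unfold Pre_solution; infer_instance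
def pvWitness_solution : List String × List String × Int :=
  (["muzi", "frodo", "apeach", "neo"],
   ["muzi frodo", "apeach frodo", "frodo neo", "muzi neo", "apeach muzi"], 2)
def Spec_solution (id_list : List String) (report : List String) (k : Int) (out : List Int) : Prop := out = solution_alt id_list report k
instance (id_list : List String) (report : List String) (k : Int) (out : List Int) : Decidable (Spec_solution id_list report k out) := by unfold Spec_solution; infer_instance

-- ===== CLAIM (what is proved, stated in full; the proofs are below) =====
def Claim_equal_solution : Prop := ∀ (id_list : List String) (report : List String) (k : Int), Dom_solution id_list report k → Pre_solution id_list report k → Spec_solution id_list report k (solution id_list report k)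

-- ===== LEMMAS AND PROOFS =====

-- Named pieces of the two ports (definitionally equal to the ports' let-bound sub-terms).
def pIdx (id_list : List String) : PySem.Dict String Int :=
  (PySem.List.pyRange 0 (PySem.List.len id_list) 1).foldl
    (fun d i => d.insert (PySem.List.pyGetD id_list i "") i) PySem.Dict.empty

def pRepStep (d : PySem.Dict String (PySem.Set String)) (rpt : String) : PySem.Dict String (PySem.Set String) :=
  match PySem.Str.split? rpt " " with
  | some [user, reported_user] =>
    let d := if d.contains reported_user then d else d.insert reported_user PySem.Set.empty
    d.modify reported_user PySem.Set.empty (fun s => PySem.Set.add s user)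
  | _ => d

def pRep (report : List String) : PySem.Dict String (PySem.Set String) :=
  report.foldl pRepStep PySem.Dict.empty

def pPairsStep (s : PySem.Set (String × String)) (r : String) : PySem.Set (String × String) :=
  let parts := (PySem.Str.split? r " ").getD []
  if parts.length = 2 then PySem.Set.add s (parts.getD 0 "", parts.getD 1 "")
  else s

def pPairs (report : List String) : PySem.Set (String × String) :=
  report.foldl pPairsStep PySem.Set.empty

def pCounts (report : List String) : PySem.Dict String Int :=
  (pPairs report).foldl (fun d p => d.insert p.2 (d.getD p.2 0 + 1)) PySem.Dict.empty

def pByRep (report : List String) : PySem.Dict String (PySem.Set String) :=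
  (pPairs report).foldl (fun d p => d.modify p.1 PySem.Set.empty (fun s => PySem.Set.add s p.2)) PySem.Dict.empty

def answer0 (id_list : List String) : List Int :=
  (PySem.List.pyRange 0 (PySem.List.len id_list) 1).map (fun _ => 0)

def innerStep (id_list : List String) (ans : List Int) (user : String) : List Int :=
  let i := ((pIdx id_list).get? user).getD 0
  PySem.List.pySetD ans i (PySem.List.pyGetD ans i 0 + 1)

def outerStep (id_list : List String) (k : Int) (answer : List Int) (p : String × PySem.Set String) : List Int :=
  if PySem.Set.len p.2 < k then answer else p.2.foldl (innerStep id_list) answer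

lemma length_eq_of_mem_iff {α : Type} {l₁ l₂ : List α} (h₁ : l₁.Nodup) (h₂ : l₂.Nodup)
    (h : ∀ a, a ∈ l₁ ↔ a ∈ l₂) : l₁.length = l₂.length :=
  ((List.perm_ext_iff_of_nodup h₁ h₂).mpr h).length_eq

lemma solution_eq (id_list report : List String) (k : Int) :
    solution id_list report k = (pRep report).items.foldl (outerStep id_list k) (answer0 id_list) := rfl

lemma solution_alt_eq (id_list report : List String) (k : Int) :
    solution_alt id_list report k =
      id_list.map (fun u =>
        (((((pByRep report).getD u PySem.Set.empty).filter
            (fun v => decide (k ≤ (pCounts report).getD v 0))).length : Nat) : Int)) := rfl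

-- all rows of `report` split into exactly two tokens
def RowsOK (report : List String) : Prop :=
  ∀ r ∈ report, ∃ u v, PySem.Str.split? r " " = some [u, v]

lemma rowsOK_of_len2 (report : List String)
    (h : ∀ r ∈ report, ((PySem.Str.split? r " ").getD []).length = 2) : RowsOK report := by
  intro r hr
  have hlen := h r hr
  cases hs : PySem.Str.split? r " " with
  | none => rw [hs] at hlen; simp at hlen
  | some parts =>
    rw [hs] at hlen; simp only [Option.getD_some] at hlen
    obtain ⟨a, b, rfl⟩ := List.length_eq_two.mp hlen
    exact ⟨a, b, rfl⟩

lemma rowPair_eq (r u v : String) (hs : PySem.Str.split? r " " = some [u, v]) :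
    rowPair r = (u, v) := by
  simp [rowPair, hs]

-- invariant tying A's victim-keyed dict to B's deduped pair set
def InvAB (d : PySem.Dict String (PySem.Set String)) (P : PySem.Set (String × String)) : Prop :=
  d.keys.Nodup ∧ P.Nodup ∧
  (∀ u v, (u, v) ∈ P ↔ u ∈ d.getD v PySem.Set.empty) ∧
  (∀ v, v ∈ d.keys ↔ ∃ u, (u, v) ∈ P) ∧
  (∀ v, (d.getD v PySem.Set.empty).Nodup)

lemma getD_pRepStep (d : PySem.Dict String (PySem.Set String)) (r u v w : String)
    (h : PySem.Str.split? r " " = some [u, v]) :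
    (pRepStep d r).getD w PySem.Set.empty =
      if w = v then PySem.Set.add (d.getD v PySem.Set.empty) u else d.getD w PySem.Set.empty := by
  simp only [pRepStep, h]
  by_cases hc : d.contains v
  · simp only [hc, if_true, PySem.Dict.getD_modify]
  · simp only [hc, Bool.false_eq_true, if_false, PySem.Dict.getD_modify, PySem.Dict.getD_insert]
    rw [PySem.Dict.getD_of_not_contains d PySem.Set.empty (by simpa using hc)]
    split_ifs <;> simp

lemma mem_keys_pRepStep (d : PySem.Dict String (PySem.Set String)) (r u v w : String)
    (h : PySem.Str.split? r " " = some [u, v]) :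
    w ∈ (pRepStep d r).keys ↔ w = v ∨ w ∈ d.keys := by
  simp only [pRepStep, h, PySem.Dict.keys_modify]
  by_cases hc : d.contains v
  · simp only [hc, if_true, PySem.Dict.mem_keys_insert]
  · simp only [hc, Bool.false_eq_true, if_false, PySem.Dict.mem_keys_insert]
    tauto

lemma nodup_keys_pRepStep (d : PySem.Dict String (PySem.Set String)) (r : String)
    (h : d.keys.Nodup) : (pRepStep d r).keys.Nodup := by
  unfold pRepStep
  cases hs : PySem.Str.split? r " " with
  | none => simpa using h
  | some parts =>
    match parts with
    | [] => simpa using h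
    | [a] => simpa using h
    | [a, b] =>
      simp only [PySem.Dict.keys_modify]
      by_cases hc : d.contains b
      · simp only [hc, if_true]
        exact PySem.Dict.nodup_keys_insert _ _ _ h
      · simp only [hc, Bool.false_eq_true, if_false]
        exact PySem.Dict.nodup_keys_insert _ _ _ (PySem.Dict.nodup_keys_insert _ _ _ h)
    | a :: b :: c :: t => simpa using h

lemma invAB_step (d : PySem.Dict String (PySem.Set String)) (P : PySem.Set (String × String))
    (r : String) (hi : InvAB d P) : InvAB (pRepStep d r) (pPairsStep P r) := by
  obtain ⟨h1, h2, h3, h4, h5⟩ := hi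
  cases hs : PySem.Str.split? r " " with
  | none =>
    have hA : pRepStep d r = d := by simp [pRepStep, hs]
    have hB : pPairsStep P r = P := by simp [pPairsStep, hs]
    rw [hA, hB]
    exact ⟨h1, h2, h3, h4, h5⟩
  | some parts =>
    match parts with
    | [] =>
      have hA : pRepStep d r = d := by simp [pRepStep, hs]
      have hB : pPairsStep P r = P := by simp [pPairsStep, hs]
      rw [hA, hB]
      exact ⟨h1, h2, h3, h4, h5⟩
    | [a] =>
      have hA : pRepStep d r = d := by simp [pRepStep, hs]
      have hB : pPairsStep P r = P := by simp [pPairsStep, hs]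
      rw [hA, hB]
      exact ⟨h1, h2, h3, h4, h5⟩
    | u :: v :: c :: t =>
      have hA : pRepStep d r = d := by simp [pRepStep, hs]
      have hB : pPairsStep P r = P := by simp [pPairsStep, hs]
      rw [hA, hB]
      exact ⟨h1, h2, h3, h4, h5⟩
    | [u, v] =>
      have hB : pPairsStep P r = PySem.Set.add P (u, v) := by simp [pPairsStep, hs]
      rw [hB]
      refine ⟨nodup_keys_pRepStep d r h1, PySem.Set.nodup_add _ _ h2, ?_, ?_, ?_⟩
      · intro a b
        rw [PySem.Set.mem_add, getD_pRepStep d r u v b hs]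
        by_cases hb : b = v
        · subst hb
          simp only [if_pos, PySem.Set.mem_add, h3 a b, Prod.mk.injEq]
          tauto
        · simp only [if_neg hb, h3 a b, Prod.mk.injEq]
          constructor
          · rintro (hm | ⟨-, hv⟩)
            · exact hm
            · exact absurd hv hb
          · exact fun hm => Or.inl hm
      · intro b
        rw [mem_keys_pRepStep d r u v b hs]
        by_cases hb : b = v
        · subst hb
          simp only [true_or, true_iff]
          exact ⟨u, by rw [PySem.Set.mem_add]; exact Or.inr rfl⟩
        · simp only [hb, false_or, h4 b]
          constructor
          · rintro ⟨a, ha⟩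
            exact ⟨a, by rw [PySem.Set.mem_add]; exact Or.inl ha⟩
          · rintro ⟨a, ha⟩
            rw [PySem.Set.mem_add] at ha
            rcases ha with ha | ha
            · exact ⟨a, ha⟩
            · exact absurd (congrArg Prod.snd ha) hb
      · intro w
        rw [getD_pRepStep d r u v w hs]
        split_ifs
        · exact PySem.Set.nodup_add _ _ (h5 v)
        · exact h5 w


lemma invAB_pRep (report : List String) : InvAB (pRep report) (pPairs report) := by
  have base : InvAB PySem.Dict.empty PySem.Set.empty := by
    refine ⟨PySem.Dict.nodup_keys_empty, List.nodup_nil, ?_, ?_, ?_⟩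
    · intro u v
      simp [PySem.Set.empty, PySem.Dict.getD_empty]
    · intro v
      simp [PySem.Set.empty, PySem.Dict.keys_empty]
    · intro v
      simp [PySem.Dict.getD_empty, PySem.Set.empty]
  have gen : ∀ (l : List String) (d : PySem.Dict String (PySem.Set String))
      (P : PySem.Set (String × String)), InvAB d P →
      InvAB (l.foldl pRepStep d) (l.foldl pPairsStep P) := by
    intro l
    induction l with
    | nil => intro d P h; exact h
    | cons r rs ih => intro d P h; exact ih _ _ (invAB_step d P r h)
  exact gen report _ _ base


-- the deduped pair set is exactly the set of row pairs
lemma pPairs_mem (report : List String) (hok : RowsOK report) (x : String × String) :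
    x ∈ pPairs report ↔ ∃ r ∈ report, rowPair r = x := by
  have gen : ∀ (l : List String), (∀ r ∈ l, ∃ u v, PySem.Str.split? r " " = some [u, v]) →
      ∀ (P : PySem.Set (String × String)),
      (x ∈ l.foldl pPairsStep P ↔ x ∈ P ∨ ∃ r ∈ l, rowPair r = x) := by
    intro l
    induction l with
    | nil => intro _ P; simp
    | cons r rs ih =>
      intro hl P
      obtain ⟨u, v, hs⟩ := hl r List.mem_cons_self
      have hB : pPairsStep P r = PySem.Set.add P (u, v) := by simp [pPairsStep, hs]
      rw [List.foldl_cons, hB, ih (fun r' hr' => hl r' (List.mem_cons_of_mem _ hr')) _,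
        PySem.Set.mem_add]
      constructor
      · rintro ((h | h) | h)
        · exact Or.inl h
        · exact Or.inr ⟨r, List.mem_cons_self, by rw [rowPair_eq r u v hs, h]⟩
        · obtain ⟨r', hr', hx⟩ := h
          exact Or.inr ⟨r', List.mem_cons_of_mem _ hr', hx⟩
      · rintro (h | ⟨r', hr', hx⟩)
        · exact Or.inl (Or.inl h)
        · rcases List.mem_cons.mp hr' with rfl | hr''
          · exact Or.inl (Or.inr (by rw [← hx, rowPair_eq r' u v hs]))
          · exact Or.inr ⟨r', hr'', hx⟩
  unfold pPairs
  rw [gen report hok PySem.Set.empty]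
  simp [PySem.Set.empty]

-- the per-victim distinct-reporter count equals the size of A's reporter set
lemma victimCount_eq (report : List String) (hok : RowsOK report) (v : String) :
    victimCount report v = ((pRep report).getD v PySem.Set.empty).length := by
  obtain ⟨hkn, hPn, hiff, hkeys, hsn⟩ := invAB_pRep report
  unfold victimCount
  have hL : ∀ p ∈ PySem.Set.ofList ((report.map rowPair).filter (fun p => p.2 == v)), p.2 = v := by
    intro p hp
    have := (PySem.Set.mem_ofList _ _).mp hp
    simpa using (List.of_mem_filter this)
  have hlen : (PySem.Set.ofList ((report.map rowPair).filter (fun p => p.2 == v))).length =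
      ((PySem.Set.ofList ((report.map rowPair).filter (fun p => p.2 == v))).map Prod.fst).length := by
    rw [List.length_map]
  rw [hlen]
  apply length_eq_of_mem_iff
  · refine List.Nodup.map_on ?_ (PySem.Set.nodup_ofList _)
    intro x hx y hy hxy
    exact Prod.ext hxy ((hL x hx).trans (hL y hy).symm)
  · exact hsn v
  · intro a
    simp only [List.mem_map]
    constructor
    · rintro ⟨p, hp, rfl⟩
      have hpv := hL p hp
      have hpm := (PySem.Set.mem_ofList _ _).mp hp
      have : p ∈ report.map rowPair := List.mem_of_mem_filter hpm
      obtain ⟨r, hr, hrp⟩ := List.mem_map.mp this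
      have : (p.1, v) ∈ pPairs report := by
        rw [pPairs_mem report hok]
        exact ⟨r, hr, by rw [hrp, ← hpv]⟩
      exact (hiff p.1 v).mp this
    · intro ha
      have : (a, v) ∈ pPairs report := (hiff a v).mpr ha
      obtain ⟨r, hr, hrp⟩ := (pPairs_mem report hok _).mp this
      refine ⟨(a, v), ?_, rfl⟩
      rw [PySem.Set.mem_ofList]
      refine List.mem_filter.mpr ⟨?_, by simp⟩
      rw [← hrp]
      exact List.mem_map_of_mem hr

-- distinct-reporter count of B's counter = size of A's reporter set
lemma counts_getD (report : List String) (v : String) :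
    (pCounts report).getD v 0 = ((pPairs report).map Prod.snd).count v := by
  unfold pCounts
  rw [← List.foldl_map (f := Prod.snd)
    (g := fun (d : PySem.Dict String Int) (x : String) => d.insert x (d.getD x 0 + 1))]
  rw [PySem.Dict.getD_foldl_insert_add_one]
  simp [PySem.Dict.getD_empty]


lemma mem_byRep_getD (report : List String) (u v : String) :
    v ∈ (pByRep report).getD u PySem.Set.empty ↔ (u, v) ∈ pPairs report := by
  have gen : ∀ (P : List (String × String)) (d : PySem.Dict String (PySem.Set String)) (u v : String),
      v ∈ (P.foldl (fun d p => d.modify p.1 PySem.Set.empty (fun s => PySem.Set.add s p.2)) d).getD u PySem.Set.empty ↔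
        v ∈ d.getD u PySem.Set.empty ∨ (u, v) ∈ P := by
    intro P
    induction P with
    | nil => intro d u v; simp
    | cons p ps ih =>
      intro d u v
      obtain ⟨p1, p2⟩ := p
      simp only [List.foldl_cons, ih, PySem.Dict.getD_modify, List.mem_cons, Prod.mk.injEq]
      by_cases hu : u = p1
      · subst hu
        simp only [if_pos, PySem.Set.mem_add, true_and]
        tauto
      · simp only [hu, false_and, false_or, if_false]
  unfold pByRep
  rw [gen]
  simp [PySem.Dict.getD_empty, PySem.Set.empty]


lemma nodup_byRep_getD (report : List String) (u : String) :
    ((pByRep report).getD u PySem.Set.empty).Nodup := by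
  have gen : ∀ (P : List (String × String)) (d : PySem.Dict String (PySem.Set String)),
      (∀ w, (d.getD w PySem.Set.empty).Nodup) →
      ∀ w, ((P.foldl (fun d p => d.modify p.1 PySem.Set.empty (fun s => PySem.Set.add s p.2)) d).getD w PySem.Set.empty).Nodup := by
    intro P
    induction P with
    | nil => intro d h w; exact h w
    | cons p ps ih =>
      intro d h w
      refine ih _ ?_ w
      intro w'
      rw [PySem.Dict.getD_modify]
      split_ifs
      · exact PySem.Set.nodup_add _ _ (h p.1)
      · exact h w'
  exact gen _ _ (fun w => by simp [PySem.Dict.getD_empty, PySem.Set.empty]) u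


lemma set_len_eq {α : Type} (s : PySem.Set α) : PySem.Set.len s = (s.length : Int) := by
  simp [PySem.Set.len]


lemma counts_eq_card (report : List String) (v : String) :
    (pCounts report).getD v 0 = (((pRep report).getD v PySem.Set.empty).length : Int) := by
  rw [counts_getD]
  obtain ⟨hkn, hPn, hiff, hkeys, hsn⟩ := invAB_pRep report
  have h1 : ((pPairs report).map Prod.snd).count v =
      (((pPairs report).filter (fun p => p.2 == v)).map Prod.fst).length := by
    rw [List.length_map, List.count_eq_countP, List.countP_map, List.countP_eq_length_filter]
    rfl
  rw [h1]
  congr 1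
  apply length_eq_of_mem_iff
  · refine List.Nodup.map_on ?_ (hPn.filter _)
    intro x hx y hy hxy
    have hx2 : x.2 = v := by simpa using (List.of_mem_filter hx)
    have hy2 : y.2 = v := by simpa using (List.of_mem_filter hy)
    exact Prod.ext hxy (hx2.trans hy2.symm)
  · exact hsn v
  · intro a
    simp only [List.mem_map, List.mem_filter, beq_iff_eq]
    constructor
    · rintro ⟨p, ⟨hp, h2⟩, rfl⟩
      have : (p.1, v) ∈ pPairs report := by rw [← h2]; exact hp
      exact (hiff p.1 v).mp this
    · intro ha
      exact ⟨(a, v), ⟨(hiff a v).mpr ha, rfl⟩, rfl⟩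


-- index map: on a duplicate-free id_list it is the position
lemma pIdx_get (id_list : List String) (hnd : id_list.Nodup) (u : String) (hu : u ∈ id_list) :
    (pIdx id_list).get? u = some (id_list.idxOf u : Int) := by
  have hfold : pIdx id_list = (List.range id_list.length).foldl
      (fun d kk => d.insert (id_list.getD kk "") (kk : Int)) PySem.Dict.empty := by
    unfold pIdx
    rw [PySem.List.len_eq, PySem.List.pyRange_zero_nat, List.foldl_map]
    simp [PySem.List.pyGetD_natCast]
  have aux : ∀ m, m ≤ id_list.length → ∀ j, j < m → ∀ (hj : j < id_list.length),
      ((List.range m).foldl (fun d kk => d.insert (id_list.getD kk "") (kk : Int)) PySem.Dict.empty).get?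
        id_list[j] = some (j : Int) := by
    intro m
    induction m with
    | zero => intro _ j hj; omega
    | succ m ih =>
      intro hm j hj hjl
      rw [List.range_succ, List.foldl_append, List.foldl_cons, List.foldl_nil]
      have hml : m < id_list.length := by omega
      by_cases hjm : j = m
      · subst hjm
        rw [List.getD_eq_getElem _ _ hml]
        exact PySem.Dict.get?_insert_self _ _ _
      · rw [List.getD_eq_getElem _ _ hml]
        rw [PySem.Dict.get?_insert_of_ne]
        · exact ih (by omega) j (by omega) hjl
        · intro heq
          exact hjm (hnd.getElem_inj_iff.mp heq)
  have hj : id_list.idxOf u < id_list.length := List.idxOf_lt_length_of_mem hu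
  have hg : id_list[id_list.idxOf u] = u := List.getElem_idxOf hj
  have h := aux id_list.length le_rfl _ hj hj
  rw [hg] at h
  rw [hfold]
  exact h


lemma inner_spec (id_list : List String) (hnd : id_list.Nodup) (s : List String)
    (hs : s.Nodup) (hsub : ∀ u ∈ s, u ∈ id_list) (ans : List Int)
    (hlen : ans.length = id_list.length) :
    (s.foldl (innerStep id_list) ans).length = ans.length ∧
    ∀ i, i < id_list.length →
      (s.foldl (innerStep id_list) ans).getD i 0 =
        ans.getD i 0 + (if id_list[i]! ∈ s then 1 else 0) := by
  induction s generalizing ans with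
  | nil => simp
  | cons u t ih =>
    have hu : u ∈ id_list := hsub u List.mem_cons_self
    have hJ : id_list.idxOf u < id_list.length := List.idxOf_lt_length_of_mem hu
    have hgJ : id_list[id_list.idxOf u] = u := List.getElem_idxOf hJ
    have hstep : innerStep id_list ans u =
        ans.set (id_list.idxOf u) (ans.getD (id_list.idxOf u) 0 + 1) := by
      unfold innerStep
      rw [pIdx_get id_list hnd u hu]
      simp
    rw [List.foldl_cons, hstep]
    obtain ⟨ihlen, ihget⟩ := ih hs.of_cons (fun x hx => hsub x (List.mem_cons_of_mem _ hx))
      (ans.set (id_list.idxOf u) (ans.getD (id_list.idxOf u) 0 + 1))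
      (by rw [List.length_set]; exact hlen)
    refine ⟨by rw [ihlen, List.length_set], ?_⟩
    intro i hi
    rw [ihget i hi]
    have hset : (ans.set (id_list.idxOf u) (ans.getD (id_list.idxOf u) 0 + 1)).getD i 0 =
        if id_list.idxOf u = i then ans.getD (id_list.idxOf u) 0 + 1 else ans.getD i 0 := by
      rw [List.getD_eq_getElem?_getD, List.getElem?_set, List.getD_eq_getElem?_getD]
      split_ifs with h h2
      · simp
      · omega
      · rfl
    rw [hset]
    by_cases hij : id_list.idxOf u = i
    · subst hij
      have hui : id_list[id_list.idxOf u]! = u := by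
        rw [getElem!_pos id_list _ hi]
        exact hgJ
      have hnt : u ∉ t := (List.nodup_cons.mp hs).1
      rw [if_pos rfl]
      simp [hui, hnt]
    · have hui : id_list[i]! ≠ u := by
        rw [getElem!_pos id_list i hi]
        intro heq
        exact hij (hnd.getElem_inj_iff.mp (hgJ.trans heq.symm))
      rw [if_neg hij]
      have hmm : (id_list[i]! ∈ u :: t) ↔ (id_list[i]! ∈ t) :=
        ⟨fun h => (List.mem_cons.mp h).resolve_left hui, fun h => List.mem_cons.mpr (Or.inr h)⟩
      rw [if_congr hmm rfl rfl]


lemma outer_spec (id_list : List String) (k : Int) (hnd : id_list.Nodup)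
    (items : List (String × PySem.Set String))
    (hall : ∀ p ∈ items, p.2.Nodup ∧ (k ≤ PySem.Set.len p.2 → ∀ u ∈ p.2, u ∈ id_list)) (ans : List Int)
    (hlen : ans.length = id_list.length) :
    (items.foldl (outerStep id_list k) ans).length = ans.length ∧
    ∀ i, i < id_list.length →
      (items.foldl (outerStep id_list k) ans).getD i 0 =
        ans.getD i 0 +
          (items.countP (fun p => decide (k ≤ PySem.Set.len p.2) && decide (id_list[i]! ∈ p.2)) : Int) := by
  induction items generalizing ans with
  | nil => simp
  | cons p rest ih =>
    rw [List.foldl_cons]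
    have hallrest : ∀ q ∈ rest, q.2.Nodup ∧ (k ≤ PySem.Set.len q.2 → ∀ u ∈ q.2, u ∈ id_list) :=
      fun q hq => hall q (List.mem_cons_of_mem _ hq)
    by_cases hk : PySem.Set.len p.2 < k
    · have hstep : outerStep id_list k ans p = ans := by
        unfold outerStep
        rw [if_pos hk]
      rw [hstep]
      obtain ⟨l1, g1⟩ := ih hallrest ans hlen
      refine ⟨l1, ?_⟩
      intro i hi
      rw [g1 i hi, List.countP_cons]
      have hfalse : (decide (k ≤ PySem.Set.len p.2) && decide (id_list[i]! ∈ p.2)) = false := by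
        rw [decide_eq_false (not_le.mpr hk), Bool.false_and]
      rw [hfalse]
      simp
    · have hstep : outerStep id_list k ans p = p.2.foldl (innerStep id_list) ans := by
        unfold outerStep
        rw [if_neg hk]
      rw [hstep]
      obtain ⟨hp2, hp2sub⟩ := hall p List.mem_cons_self
      obtain ⟨la, ga⟩ := inner_spec id_list hnd p.2 hp2 (hp2sub (not_lt.mp hk)) ans hlen
      obtain ⟨l1, g1⟩ := ih hallrest (p.2.foldl (innerStep id_list) ans) (by rw [la]; exact hlen)
      refine ⟨by rw [l1, la], ?_⟩
      intro i hi
      rw [g1 i hi, ga i hi, List.countP_cons]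
      have hd : decide (k ≤ PySem.Set.len p.2) = true := decide_eq_true (not_lt.mp hk)
      rw [hd, Bool.true_and]
      by_cases hm : id_list[i]! ∈ p.2 <;> simp only [hm, decide_true, decide_false, if_true, if_false] <;> push_cast <;> omega


lemma main_count (id_list report : List String) (k : Int) (u : String) :
    ((pRep report).items.countP
        (fun p => decide (k ≤ PySem.Set.len p.2) && decide (u ∈ p.2)) : Int) =
      ((((pByRep report).getD u PySem.Set.empty).filter
          (fun v => decide (k ≤ (pCounts report).getD v 0))).length : Int) := by
  obtain ⟨hkn, hPn, hiff, hkeys, hsn⟩ := invAB_pRep report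
  rw [PySem.Dict.items_eq_map_keys (pRep report) hkn PySem.Set.empty]
  rw [List.countP_map, List.countP_eq_length_filter]
  congr 1
  apply length_eq_of_mem_iff
  · exact hkn.filter _
  · exact (nodup_byRep_getD report u).filter _
  · intro v
    simp only [List.mem_filter, Function.comp_apply, Bool.and_eq_true, decide_eq_true_eq,
      mem_byRep_getD report u v]
    rw [counts_eq_card report v, set_len_eq]
    constructor
    · rintro ⟨hvk, hlen, hmem⟩
      exact ⟨(hiff u v).mpr hmem, hlen⟩
    · rintro ⟨hP, hlen⟩
      exact ⟨(hkeys v).mpr ⟨u, hP⟩, hlen, (hiff u v).mp hP⟩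


-- ===== VERDICT (by name: the statement is the Claim_ definition above) =====
theorem solution_spec : Claim_equal_solution := by
  intro id_list report k _hdom hpre
  unfold Spec_solution
  obtain ⟨hnd, hlen2, hkerr⟩ := hpre
  have hok := rowsOK_of_len2 report hlen2
  rw [solution_eq, solution_alt_eq]
  obtain ⟨hkn, hPn, hiff, hkeys, hsn⟩ := invAB_pRep report
  have hall : ∀ p ∈ (pRep report).items,
      p.2.Nodup ∧ (k ≤ PySem.Set.len p.2 → ∀ u ∈ p.2, u ∈ id_list) := by
    intro p hp
    have hget : (pRep report).getD p.1 PySem.Set.empty = p.2 :=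
      PySem.Dict.getD_of_mem_items (pRep report) (by simpa using hp) hkn PySem.Set.empty
    refine ⟨hget ▸ hsn p.1, ?_⟩
    intro hk u hu
    by_contra hnot
    have hP : (u, p.1) ∈ pPairs report := (hiff u p.1).mpr (hget ▸ hu)
    obtain ⟨r, hr, hrp⟩ := (pPairs_mem report hok _).mp hP
    have h1 : (rowPair r).1 ∉ id_list := by rw [hrp]; exact hnot
    have hlt := hkerr r hr h1
    rw [hrp] at hlt
    rw [victimCount_eq report hok, hget] at hlt
    rw [set_len_eq] at hk
    omega
  have hlen0 : (answer0 id_list).length = id_list.length := by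
    simp [answer0, PySem.List.pyRange_zero_nat]
  obtain ⟨hlenF, hF⟩ := outer_spec id_list k hnd (pRep report).items hall (answer0 id_list) hlen0
  apply List.ext_getElem
  · simp [hlenF, hlen0]
  · intro i h1 h2
    have hi : i < id_list.length := by simpa [hlenF, hlen0] using h1
    have hA := hF i hi
    have h0 : (answer0 id_list).getD i 0 = 0 := by
      simp [answer0, PySem.List.pyRange_zero_nat, List.getD_eq_getElem?_getD, List.getElem?_map]
      cases hh : (List.range id_list.length)[i]? <;> simp
    rw [List.getD_eq_getElem?_getD, List.getElem?_eq_getElem h1] at hA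
    simp only [Option.getD_some] at hA
    rw [hA, h0]
    have hgetu : id_list[i]! = id_list[i] := getElem!_pos id_list i hi
    rw [List.getElem_map]
    rw [hgetu] at hA ⊢
    have := main_count id_list report k id_list[i]
    omega
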